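-- pv_equiv track=rewrite | github.com/DylanMMyers/hacktx24 | data/length.py | getDaySplitsBetweenCities
-- ===== SOURCE A (Python) =====
-- numOfCities = 3
--
-- def getDaySplitsBetweenCities(totalDays):
--     # Osaka -> Kyoto -> Tokyo
--     citySplits = []
--     totalDaysCopy = totalDays
--     for i in range(numOfCities):
--         citySplits.append(totalDays // numOfCities)
--         totalDaysCopy -= totalDays // numOfCities
--
--
--     # totalDaysCopy should be within [0, numOfCities)
--     while totalDaysCopy > 0:
--         citySplits[totalDaysCopy] += 1
--         totalDaysCopy -= 1
--
--
--     return citySplits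
-- ===== SOURCE B (Python) =====
-- def getDaySplitsBetweenCities(totalDays):
--     # Each city's share is a shifted floor division; the offsets (0, 2, 1)
--     # encode that leftover days go to cities 1 then 2.
--     return [(totalDays + k) // 3 for k in (0, 2, 1)]
-- ===== Notes on version B (the rewrite author's own statement) =====
-- stated objective: simpler
-- what changed: Replaces A's fill-equal loop and countdown redistribution loop with one branch-free comprehension computing each city's share independently as a shifted floor division of totalDays by three, the per-city offsets encoding that leftovers go to the middle and last cities.
import Mathlib
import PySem

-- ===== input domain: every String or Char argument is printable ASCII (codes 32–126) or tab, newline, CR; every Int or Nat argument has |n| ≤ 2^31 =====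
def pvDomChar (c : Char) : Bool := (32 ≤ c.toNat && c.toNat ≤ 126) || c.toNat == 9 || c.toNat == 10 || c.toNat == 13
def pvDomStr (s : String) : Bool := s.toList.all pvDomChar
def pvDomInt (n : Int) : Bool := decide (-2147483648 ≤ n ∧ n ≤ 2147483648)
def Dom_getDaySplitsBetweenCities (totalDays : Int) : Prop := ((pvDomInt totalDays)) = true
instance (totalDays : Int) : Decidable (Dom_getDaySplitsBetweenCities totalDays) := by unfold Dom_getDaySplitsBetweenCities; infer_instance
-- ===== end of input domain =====

-- B replaces A's fill-then-redistribute loops with a branch-free per-city shifted floor-division formula (simpler).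


-- ===== PORT A =====
-- the `while totalDaysCopy > 0` loop; citySplits[c] += 1 via List.set (c is
-- always a valid index 1 or 2 when reached, so List.set matches Python exactly)
def pvWhileA (citySplits : List Int) (c : Int) : List Int :=
  if c > 0 then
    pvWhileA (citySplits.set c.toNat ((citySplits.getD c.toNat 0) + 1)) (c - 1)
  else citySplits
termination_by c.toNat
decreasing_by omega

def getDaySplitsBetweenCities (totalDays : Int) : List Int :=
  let st := (PySem.List.pyRange 0 3 1).foldl
    (fun (st : List Int × Int) _ =>
      (st.1 ++ [PySem.Int.floordiv totalDays 3], st.2 - PySem.Int.floordiv totalDays 3))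
    ([], totalDays)
  pvWhileA st.1 st.2

-- ===== PORT B =====
def getDaySplitsBetweenCities_alt (totalDays : Int) : List Int :=
  [(0 : Int), 2, 1].map (fun k => PySem.Int.floordiv (totalDays + k) 3)

-- ===== PRECONDITION & SPEC =====
def Spec_getDaySplitsBetweenCities (totalDays : Int) (out : List Int) : Prop := out = getDaySplitsBetweenCities_alt totalDays
instance (totalDays : Int) (out : List Int) : Decidable (Spec_getDaySplitsBetweenCities totalDays out) := by unfold Spec_getDaySplitsBetweenCities; infer_instance

-- ===== CLAIM (what is proved, stated in full; the proofs are below) =====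
def Claim_equal_getDaySplitsBetweenCities : Prop := ∀ (totalDays : Int), Dom_getDaySplitsBetweenCities totalDays → Spec_getDaySplitsBetweenCities totalDays (getDaySplitsBetweenCities totalDays)

-- ===== LEMMAS AND PROOFS =====

theorem pvWhileA_zero (cs : List Int) : pvWhileA cs 0 = cs := by
  rw [pvWhileA]; simp

theorem pvWhileA_step (cs : List Int) (c : Int) (h : c > 0) :
    pvWhileA cs c = pvWhileA (cs.set c.toNat ((cs.getD c.toNat 0) + 1)) (c - 1) := by
  rw [pvWhileA]; simp [h]

theorem pvWhileA_one (a q c : Int) : pvWhileA [a, q, c] 1 = [a, q + 1, c] := by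
  rw [pvWhileA_step _ _ (by norm_num)]
  show pvWhileA [a, q + 1, c] 0 = _
  exact pvWhileA_zero _

theorem pvWhileA_two (q : Int) : pvWhileA [q, q, q] 2 = [q, q + 1, q + 1] := by
  rw [pvWhileA_step _ _ (by norm_num)]
  show pvWhileA [q, q, q + 1] 1 = _
  exact pvWhileA_one q q (q + 1)

-- ===== VERDICT (by name: the statement is the Claim_ definition above) =====
theorem getDaySplitsBetweenCities_spec : Claim_equal_getDaySplitsBetweenCities := by
  intro t _
  show _ = _
  unfold getDaySplitsBetweenCities getDaySplitsBetweenCities_alt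
  simp only [PySem.Int.floordiv_eq_ediv_of_pos (b := 3) (by norm_num)]
  rw [show PySem.List.pyRange 0 3 1 = [(0 : Int), 1, 2] from by decide]
  simp only [List.foldl, List.nil_append, List.map]
  have hm : 3 * (t / 3) + t % 3 = t := Int.mul_ediv_add_emod t 3
  have h0 : 0 ≤ t % 3 := Int.emod_nonneg t (by norm_num)
  have h3 : t % 3 < 3 := Int.emod_lt_of_pos t (by norm_num)
  have hr : t - t / 3 - t / 3 - t / 3 = t % 3 := by omega
  rw [hr]
  have e0 : (t + 0) / 3 = t / 3 := by rw [add_zero]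
  have e2 : (t + 2) / 3 = t / 3 + (if t % 3 ≥ 1 then 1 else 0) := by
    split_ifs with h <;> omega
  have e1 : (t + 1) / 3 = t / 3 + (if t % 3 ≥ 2 then 1 else 0) := by
    split_ifs with h <;> omega
  interval_cases h : (t % 3) <;>
    simp_all [pvWhileA_zero, pvWhileA_one, pvWhileA_two]
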